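-- pv_equiv track=rewrite | github.com/CLM-BONNY/algorithm | 백준/Silver/18111. 마인크래프트/마인크래프트.py | flatten_land
-- ===== SOURCE A (Python) =====
-- def flatten_land(n, m, b, land):
--     # 높이별 블록 개수를 저장하는 딕셔너리
--     height_counts = [0] * 257
--
--     # 높이별 블록 개수 집계
--     for i in range(n):
--         for j in range(m):
--             height_counts[land[i][j]] += 1
--
--     # 가능한 높이를 순회하며 최소 시간 계산
--     min_time = float('inf')
--     best_height = 0
--
--     # 모든 높이에 대해 시뮬레이션
--     for target_height in range(257):
--         remove_blocks = 0
--         add_blocks = 0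
--
--         for h in range(257):
--             if height_counts[h] > 0:
--                 if h > target_height:  # 블록 제거가 필요
--                     remove_blocks += (h - target_height) * height_counts[h]
--                 elif h < target_height:  # 블록 추가가 필요
--                     add_blocks += (target_height - h) * height_counts[h]
--
--         # 현재 인벤토리로 가능 여부 확인
--         if remove_blocks + b >= add_blocks:
--             time = remove_blocks * 2 + add_blocks
--             # 최소 시간으로 갱신하거나, 시간이 같다면 더 높은 땅 선택
--             if time < min_time or (time == min_time and target_height > best_height):
--                 min_time = time
--                 best_height = target_height
--
--     return min_time, best_height
-- ===== SOURCE B (Python) =====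
-- def flatten_land(n, m, b, land):
--     # Count heights into a dict in one pass (also totals), then sweep targets
--     # 0..256 with running prefix sums so each target costs O(1) instead of a
--     # 257-bucket rescan; ascending sweep with `<=` keeps the higher tie height.
--     counts = {}
--     total_cnt = 0
--     total_sum = 0
--     for row in land[:max(n, 0)]:
--         for h in row[:max(m, 0)]:
--             counts[h] = counts.get(h, 0) + 1
--             total_cnt += 1
--             total_sum += h
--     best = None
--     below_cnt = 0
--     below_sum = 0
--     for t in range(257):
--         c = counts.get(t, 0)
--         add = t * below_cnt - below_sum
--         above_cnt = total_cnt - below_cnt - c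
--         above_sum = total_sum - below_sum - t * c
--         remove = above_sum - t * above_cnt
--         if remove + b >= add:
--             time = remove * 2 + add
--             if best is None or time <= best[0]:
--                 best = (time, t)
--         below_cnt += c
--         below_sum += t * c
--     return best
-- ===== Notes on version B (the rewrite author's own statement) =====
-- stated objective: alternative
-- what changed: B counts heights into a dict in one pass (also accumulating total count and sum) and sweeps targets 0..256 with running prefix sums, computing add/remove in O(1) per target instead of A's 257-bucket rescan per target; the ascending sweep with <= reproduces A's prefer-higher-height tie-break.
-- outside the precondition, e.g. on flatten_land(1, 1, 10, [[-1]]): A returns (0, 256), B returns (-20, 9); on flatten_land(1, 1, -100, [[0]]): A returns (inf, 0), B returns None; on flatten_land(1, 1, 0, [[-2]]): A returns (0, 255), B returns None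
import Mathlib
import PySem

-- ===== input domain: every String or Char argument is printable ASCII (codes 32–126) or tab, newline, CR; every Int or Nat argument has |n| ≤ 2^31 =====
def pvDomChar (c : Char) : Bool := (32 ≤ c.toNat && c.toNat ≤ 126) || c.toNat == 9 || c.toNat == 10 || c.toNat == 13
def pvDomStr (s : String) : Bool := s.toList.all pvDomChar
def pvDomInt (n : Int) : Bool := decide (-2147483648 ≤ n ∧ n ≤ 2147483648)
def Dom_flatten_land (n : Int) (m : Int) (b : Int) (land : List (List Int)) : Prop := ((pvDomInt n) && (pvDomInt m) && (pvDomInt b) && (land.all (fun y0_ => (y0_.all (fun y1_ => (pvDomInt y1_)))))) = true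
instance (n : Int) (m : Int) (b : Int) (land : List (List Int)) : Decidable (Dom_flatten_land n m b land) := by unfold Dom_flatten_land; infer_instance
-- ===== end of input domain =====

-- B replaces A's per-target 257-bucket rescan by a dict height count plus running
-- prefix sums (O(1) per target), keeping A's higher-height tie-break; proved equal on
-- the natural domain (0 ≤ n ≤ len(land), 0 ≤ m ≤ row lengths, heights 0..256, feasible b).


-- ===== PORT A =====
-- height_counts[h] += 1 (pyIdx? none = IndexError, excluded by Pre_, modeled as no-op)
def pvA_bump (hc : List Int) (h : Int) : List Int :=
  match PySem.List.pyIdx? hc.length h with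
  | some k => hc.set k (hc.getD k 0 + 1)
  | none => hc

-- the two nested counting loops over range(n) × range(m)
def pvA_counts (n : Int) (m : Int) (land : List (List Int)) : List Int :=
  (PySem.List.pyRange 0 n 1).foldl (fun hc i =>
    (PySem.List.pyRange 0 m 1).foldl (fun hc j =>
      pvA_bump hc (PySem.List.pyGetD (PySem.List.pyGetD land i []) j 0)) hc)
    (List.replicate 257 (0 : Int))

-- the inner 'for h in range(257)' scan computing (remove_blocks, add_blocks)
def pvA_scan (hc : List Int) (t : Int) : Int × Int :=
  (PySem.List.pyRange 0 257 1).foldl (fun ra h =>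
    let c := PySem.List.pyGetD hc h 0
    if c > 0 then
      if h > t then (ra.1 + (h - t) * c, ra.2)
      else if h < t then (ra.1, ra.2 + (t - h) * c)
      else ra
    else ra) (0, 0)

-- one iteration of the target loop; state = (min_time as Option (none = inf), best_height)
def pvA_pick (b : Int) (hc : List Int) (s : Option Int × Int) (t : Int) : Option Int × Int :=
  let ra := pvA_scan hc t
  if ra.1 + b ≥ ra.2 then
    let time := ra.1 * 2 + ra.2
    match s.1 with
    | none => (some time, t)
    | some mt => if time < mt ∨ (time = mt ∧ t > s.2) then (some time, t) else s
  else s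

def flatten_land (n : Int) (m : Int) (b : Int) (land : List (List Int)) : Int × Int :=
  let hc := pvA_counts n m land
  let st := (PySem.List.pyRange 0 257 1).foldl (pvA_pick b hc) (none, 0)
  -- min_time still inf (no feasible target): Python returns the float inf, excluded by Pre_
  match st.1 with
  | some mt => (mt, st.2)
  | none => (0, 0)

-- ===== PORT B =====
-- one pass over land[:max(n,0)] rows (row[:max(m,0)] cells): dict counts + total count/sum
def pvB_count (n : Int) (m : Int) (land : List (List Int)) :
    PySem.Dict Int Int × Int × Int :=
  (PySem.List.slice land none (some (max n 0))).foldl (fun s row =>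
    (PySem.List.slice row none (some (max m 0))).foldl (fun s h =>
      (s.1.insert h (s.1.getD h 0 + 1), s.2.1 + 1, s.2.2 + h)) s)
    (PySem.Dict.empty, 0, 0)

-- one iteration of the target sweep; state = (best as Option (time, height), below_cnt, below_sum)
def pvB_step (b C S : Int) (counts : PySem.Dict Int Int)
    (s : Option (Int × Int) × Int × Int) (t : Int) : Option (Int × Int) × Int × Int :=
  let c := counts.getD t 0
  let add := t * s.2.1 - s.2.2
  let aboveCnt := C - s.2.1 - c
  let aboveSum := S - s.2.2 - t * c
  let rem := aboveSum - t * aboveCnt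
  let best :=
    if rem + b ≥ add then
      let time := rem * 2 + add
      match s.1 with
      | none => some (time, t)
      | some p => if time ≤ p.1 then some (time, t) else s.1
    else s.1
  (best, s.2.1 + c, s.2.2 + t * c)

def flatten_land_alt (n : Int) (m : Int) (b : Int) (land : List (List Int)) : Int × Int :=
  let c3 := pvB_count n m land
  let fin := (PySem.List.pyRange 0 257 1).foldl (pvB_step b c3.2.1 c3.2.2 c3.1) (none, 0, 0)
  -- best still None (no feasible target): Python returns None, excluded by Pre_
  match fin.1 with
  | some p => p
  | none => (0, 0)

-- ===== PRECONDITION & SPEC =====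
-- Pre_ restricts to the problem's natural domain: 0 ≤ n ≤ len(land), 0 ≤ m ≤ each counted
-- row's length, heights in 0..256, and enough inventory for some target. Outside it A either
-- raises IndexError, returns the non-int (inf, 0), or returns a value produced by Python's
-- negative-index wraparound / negative-slice accidents (excluded, see cites).
def Pre_flatten_land (n : Int) (m : Int) (b : Int) (land : List (List Int)) : Prop :=
  (0 < n → 0 < m → n ≤ (land.length : Int) ∧
    ∀ row ∈ land.take n.toNat,
      m ≤ (row.length : Int) ∧ ∀ h ∈ row.take m.toNat, 0 ≤ h ∧ h ≤ 256) ∧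
  0 ≤ b + ((land.take n.toNat).map (fun r => (r.take m.toNat).sum)).sum
instance (n : Int) (m : Int) (b : Int) (land : List (List Int)) : Decidable (Pre_flatten_land n m b land) := by unfold Pre_flatten_land; infer_instance

def pvWitness_flatten_land : Int × Int × Int × List (List Int) := (1, 2, 0, [[1, 2]])

def Spec_flatten_land (n : Int) (m : Int) (b : Int) (land : List (List Int)) (out : Int × Int) : Prop := out = flatten_land_alt n m b land
instance (n : Int) (m : Int) (b : Int) (land : List (List Int)) (out : Int × Int) : Decidable (Spec_flatten_land n m b land out) := by unfold Spec_flatten_land; infer_instance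

-- ===== CLAIM (what is proved, stated in full; the proofs are below) =====
def Claim_equal_flatten_land : Prop := ∀ (n : Int) (m : Int) (b : Int) (land : List (List Int)), Dom_flatten_land n m b land → Pre_flatten_land n m b land → Spec_flatten_land n m b land (flatten_land n m b land)

-- ===== LEMMAS AND PROOFS =====

-- the counted cells, as one flat list
def pvCells (n : Int) (m : Int) (land : List (List Int)) : List Int :=
  ((land.take n.toNat).map (fun r => r.take m.toNat)).flatten

-- occurrence count of height h among the cells
def pvCnt (cells : List Int) (h : Int) : Int := (cells.count h : Int)

-- prefix sums over heights < t, and A's remove/add per target, as range sums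
def pvLo (cnt : Int → Int) (t : Int) : Int := ((PySem.List.pyRange 0 t 1).map cnt).sum
def pvLoS (cnt : Int → Int) (t : Int) : Int := ((PySem.List.pyRange 0 t 1).map (fun h => h * cnt h)).sum
def pvRem (cnt : Int → Int) (t : Int) : Int := ((PySem.List.pyRange (t+1) 257 1).map (fun h => (h - t) * cnt h)).sum
def pvAdd (cnt : Int → Int) (t : Int) : Int := ((PySem.List.pyRange 0 t 1).map (fun h => (t - h) * cnt h)).sum

-- canonical forms of the two per-target steps, phrased over the abstract count function
def pvAstep (cnt : Int → Int) (b : Int) (s : Option Int × Int) (t : Int) : Option Int × Int :=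
  if pvRem cnt t + b ≥ pvAdd cnt t then
    let time := pvRem cnt t * 2 + pvAdd cnt t
    match s.1 with
    | none => (some time, t)
    | some mt => if time < mt ∨ (time = mt ∧ t > s.2) then (some time, t) else s
  else s

def pvBstep (cnt : Int → Int) (b C S : Int) (s : Option (Int × Int) × Int × Int) (t : Int) :
    Option (Int × Int) × Int × Int :=
  let c := cnt t
  let add := t * s.2.1 - s.2.2
  let rem := (S - s.2.2 - t * c) - t * (C - s.2.1 - c)
  let best :=
    if rem + b ≥ add then
      let time := rem * 2 + add
      match s.1 with
      | none => some (time, t)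
      | some p => if time ≤ p.1 then some (time, t) else s.1
    else s.1
  (best, s.2.1 + c, s.2.2 + t * c)

-- relation between A's (min_time option, best_height) and B's best option
def pvRel (sA : Option Int × Int) (o : Option (Int × Int)) (t0 : Int) : Prop :=
  (sA.1 = none ∧ o = none) ∨ (∃ mt, sA.1 = some mt ∧ o = some (mt, sA.2) ∧ sA.2 < t0)

lemma pv_sum_map_add (l : List Int) (f g : Int → Int) :
    (l.map (fun x => f x + g x)).sum = (l.map f).sum + (l.map g).sum := by
  induction l with
  | nil => simp
  | cons a l ih => simp [ih]; ring

lemma pv_sum_map_sub (l : List Int) (f g : Int → Int) :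
    (l.map (fun x => f x - g x)).sum = (l.map f).sum - (l.map g).sum := by
  induction l with
  | nil => simp
  | cons a l ih => simp [ih]; ring

lemma pv_sum_ite (l : List Int) (f : Int → Int) (a : Int) (hnd : l.Nodup) (ha : a ∈ l) :
    (l.map (fun h => if h = a then f h else 0)).sum = f a := by
  induction l with
  | nil => cases ha
  | cons x l ih =>
    rcases List.nodup_cons.mp hnd with ⟨hx, hl⟩
    rcases List.mem_cons.mp ha with h | h
    · subst h
      have hz : ∀ y ∈ l.map (fun h => if h = a then f h else 0), y = 0 := by
        intro y hy
        rcases List.mem_map.mp hy with ⟨h, hh, rfl⟩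
        simp [show h ≠ a from fun e => hx (e ▸ hh)]
      simp [List.sum_eq_zero hz]
    · have hxa : x ≠ a := fun e => hx (e ▸ h)
      simp only [List.map_cons, List.sum_cons, if_neg hxa, ih hl h]
      ring

lemma pv_getD_set (xs : List Int) (j k : Nat) (v d : Int) (h : j < xs.length) :
    (xs.set j v).getD k d = if k = j then v else xs.getD k d := by
  rw [List.getD_eq_getElem?_getD, List.getD_eq_getElem?_getD, List.getElem?_set]
  split
  · next hjk => subst hjk; simp
  · next hjk => rw [if_neg (by omega)]

lemma pv_getD_replicate (k : Nat) (hk : k < 257) : (List.replicate 257 (0:Int)).getD k 0 = 0 := by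
  rw [List.getD_eq_getElem?_getD, List.getElem?_replicate]
  simp [hk]

lemma pv_lo_zero (cnt : Int → Int) : pvLo cnt 0 = 0 := by
  simp [pvLo, PySem.List.pyRange_one_eq_nil]

lemma pv_los_zero (cnt : Int → Int) : pvLoS cnt 0 = 0 := by
  simp [pvLoS, PySem.List.pyRange_one_eq_nil]

lemma pv_lo_succ (cnt : Int → Int) (t : Int) (h : 0 ≤ t) :
    pvLo cnt (t + 1) = pvLo cnt t + cnt t := by
  simp [pvLo, PySem.List.pyRange_one_succ_right h]

lemma pv_los_succ (cnt : Int → Int) (t : Int) (h : 0 ≤ t) :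
    pvLoS cnt (t + 1) = pvLoS cnt t + t * cnt t := by
  simp [pvLoS, PySem.List.pyRange_one_succ_right h]

lemma pv_add_eq (cnt : Int → Int) (t : Int) :
    pvAdd cnt t = t * pvLo cnt t - pvLoS cnt t := by
  unfold pvAdd pvLo pvLoS
  rw [show (fun h => (t - h) * cnt h) = (fun h => t * cnt h - h * cnt h) from funext (fun h => by ring)]
  rw [pv_sum_map_sub, PySem.List.sum_map_const_mul_int]

lemma pv_rem_eq (cnt : Int → Int) (t : Int) (h0 : 0 ≤ t) (h1 : t < 257) :
    pvRem cnt t = (pvLoS cnt 257 - pvLoS cnt t - t * cnt t) - t * (pvLo cnt 257 - pvLo cnt t - cnt t) := by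
  have hsplit : PySem.List.pyRange 0 257 1 =
      PySem.List.pyRange 0 t 1 ++ t :: PySem.List.pyRange (t + 1) 257 1 := by
    rw [PySem.List.pyRange_one_append 0 t 257 h0 (by omega), PySem.List.pyRange_one_cons h1]
  unfold pvRem pvLo pvLoS
  rw [hsplit]
  simp only [List.map_append, List.sum_append, List.map_cons, List.sum_cons]
  have hr : ((PySem.List.pyRange (t+1) 257 1).map (fun h => (h - t) * cnt h)).sum
      = ((PySem.List.pyRange (t+1) 257 1).map (fun h => h * cnt h)).sum
        - t * ((PySem.List.pyRange (t+1) 257 1).map cnt).sum := by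
    rw [show (fun h => (h - t) * cnt h) = (fun h => h * cnt h - t * cnt h) from funext (fun h => by ring)]
    rw [pv_sum_map_sub, PySem.List.sum_map_const_mul_int]
  rw [hr]; ring

-- counting loop invariant for A's histogram
lemma pv_count_inv (xs : List Int) : ∀ (hc : List Int), hc.length = 257 →
    (∀ x ∈ xs, 0 ≤ x ∧ x ≤ 256) →
    (xs.foldl pvA_bump hc).length = 257 ∧
    ∀ k : Nat, k < 257 →
      (xs.foldl pvA_bump hc).getD k 0 = hc.getD k 0 + (xs.count (k : Int) : Int) := by
  induction xs with
  | nil => intro hc hlen _; simpa using hlen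
  | cons a xs ih =>
    intro hc hlen hb
    have ha := hb a (List.mem_cons_self ..)
    have hidx : PySem.List.pyIdx? hc.length a = some a.toNat := by
      rw [hlen]
      simp only [PySem.List.pyIdx?, if_pos ha.1]
      rw [if_pos (by exact_mod_cast (by omega : a < (257:Int)))]
    have hstep : pvA_bump hc a = hc.set a.toNat (hc.getD a.toNat 0 + 1) := by
      rw [pvA_bump, hidx]
    have hlen' : (pvA_bump hc a).length = 257 := by rw [hstep]; simpa using hlen
    obtain ⟨hl, hpt⟩ := ih (pvA_bump hc a) hlen' (fun x hx => hb x (List.mem_cons_of_mem _ hx))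
    refine ⟨by simpa using hl, ?_⟩
    intro k hk
    rw [List.foldl_cons, hpt k hk, hstep,
        pv_getD_set hc a.toNat k _ 0 (by rw [hlen]; omega)]
    rw [List.count_cons]
    by_cases h : k = a.toNat
    · subst h
      have he : a = ((a.toNat : Nat) : Int) := (Int.toNat_of_nonneg ha.1).symm
      rw [if_pos rfl]
      rw [show (a == ((a.toNat : Nat) : Int)) = true by simp [← he]]
      push_cast; simp; omega
    · rw [if_neg h, show (a == ((k : Nat) : Int)) = false by simp; omega]
      simp

-- a 'for i in range(n)' loop reading xs[i] is a fold over xs.take n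
lemma pv_foldl_range_take {α β : Type} (xs : List α) (n : Int) (d : α) (f : β → α → β) (init : β)
    (h0 : 0 ≤ n) (h1 : n ≤ (xs.length : Int)) :
    (PySem.List.pyRange 0 n 1).foldl (fun acc i => f acc (PySem.List.pyGetD xs i d)) init
      = (xs.take n.toNat).foldl f init := by
  have hlen : ((xs.take n.toNat).length : Int) = n := by
    simp [List.length_take]; omega
  have hb := PySem.List.foldl_pyRange_zero_pyGetD' (xs := xs.take n.toNat) (d := d) (f := f) (init := init)
  rw [hlen] at hb
  rw [← hb]
  apply PySem.List.foldl_congr_mem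
  intro acc i hi
  rw [PySem.List.mem_pyRange_one] at hi
  congr 1
  rw [PySem.List.pyGetD_eq_getElem xs d hi.1 (by omega),
      PySem.List.pyGetD_eq_getElem (xs.take n.toNat) d hi.1 (by rw [List.length_take]; omega)]
  rw [List.getElem_take]

-- A's counting loops are exactly a fold of pvA_bump over the cells
lemma pvA_counts_eq (n m : Int) (land : List (List Int))
    (h0 : 0 ≤ n) (h1 : n ≤ (land.length : Int)) (h2 : 0 ≤ m)
    (h3 : ∀ row ∈ land.take n.toNat, m ≤ (row.length : Int)) :
    pvA_counts n m land = (pvCells n m land).foldl pvA_bump (List.replicate 257 (0 : Int)) := by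
  unfold pvA_counts pvCells
  rw [pv_foldl_range_take land n []
    (fun hc row => (PySem.List.pyRange 0 m 1).foldl (fun hc j => pvA_bump hc (PySem.List.pyGetD row j 0)) hc)
    _ h0 h1]
  rw [List.foldl_flatten, List.foldl_map]
  apply PySem.List.foldl_congr_mem
  intro acc row hrow
  exact pv_foldl_range_take row m 0 pvA_bump acc h2 (h3 row hrow)

-- with no rows or no columns requested, A's counting loops never touch land
lemma pvA_counts_trivial (n m : Int) (land : List (List Int)) (h : n ≤ 0 ∨ m ≤ 0) :
    pvA_counts n m land = List.replicate 257 (0 : Int) := by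
  unfold pvA_counts
  rcases h with h | h
  · rw [PySem.List.pyRange_one_eq_nil h, List.foldl_nil]
  · have hin : PySem.List.pyRange 0 m 1 = [] := PySem.List.pyRange_one_eq_nil h
    rw [hin]
    simp only [List.foldl_nil]
    exact PySem.List.foldl_ignore ..

-- B's triple-state cell loop splits into dict fold, length and sum
lemma pvB_triple (xs : List Int) : ∀ (st : PySem.Dict Int Int × Int × Int),
    xs.foldl (fun s h => (s.1.insert h (s.1.getD h 0 + 1), s.2.1 + 1, s.2.2 + h)) st
    = (xs.foldl (fun d h => d.insert h (d.getD h 0 + 1)) st.1,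
       st.2.1 + (xs.length : Int), st.2.2 + xs.sum) := by
  induction xs with
  | nil => intro st; simp
  | cons a xs ih =>
    intro st
    rw [List.foldl_cons, ih, List.foldl_cons]
    refine Prod.ext rfl (Prod.ext ?_ ?_) <;> (simp; omega)

lemma pvB_rows (G : List Int → List Int) (rows : List (List Int)) :
    ∀ (st : PySem.Dict Int Int × Int × Int),
    rows.foldl (fun s row => (G row).foldl (fun s h =>
      (s.1.insert h (s.1.getD h 0 + 1), s.2.1 + 1, s.2.2 + h)) s) st
    = ((rows.map G).flatten.foldl (fun d h => d.insert h (d.getD h 0 + 1)) st.1,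
       st.2.1 + ((rows.map G).flatten.length : Int), st.2.2 + (rows.map G).flatten.sum) := by
  induction rows with
  | nil => intro st; simp
  | cons r rows ih =>
    intro st
    rw [List.foldl_cons, ih, pvB_triple]
    simp only [List.map_cons, List.flatten_cons, List.foldl_append, List.length_append,
      List.sum_append]
    refine Prod.ext rfl (Prod.ext ?_ ?_) <;> (simp; omega)

-- B's counting pass computes (counter dict, #cells, sum of cells)
lemma pvB_count_eq (n m : Int) (land : List (List Int)) :
    pvB_count n m land =
      ((pvCells n m land).foldl (fun d h => d.insert h (d.getD h 0 + 1)) PySem.Dict.empty,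
       ((pvCells n m land).length : Int), (pvCells n m land).sum) := by
  unfold pvB_count pvCells
  rw [show (some (max n 0)) = some ((n.toNat : Nat) : Int) by rw [Int.toNat_eq_max],
      PySem.List.slice_to_natCast]
  have hrow : ∀ (s : PySem.Dict Int Int × Int × Int) (row : List Int), row ∈ land.take n.toNat →
      (PySem.List.slice row none (some (max m 0))).foldl (fun s h =>
        (s.1.insert h (s.1.getD h 0 + 1), s.2.1 + 1, s.2.2 + h)) s
      = ((fun r : List Int => r.take m.toNat) row).foldl (fun s h =>
        (s.1.insert h (s.1.getD h 0 + 1), s.2.1 + 1, s.2.2 + h)) s := by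
    intro s row _
    rw [show (some (max m 0)) = some ((m.toNat : Nat) : Int) by rw [Int.toNat_eq_max],
        PySem.List.slice_to_natCast]
  have hcong := PySem.List.foldl_congr_mem
    (l := land.take n.toNat) (init := ((PySem.Dict.empty : PySem.Dict Int Int), (0:Int), (0:Int)))
    (f := fun (s : PySem.Dict Int Int × Int × Int) (row : List Int) =>
      (PySem.List.slice row none (some (max m 0))).foldl (fun (s : PySem.Dict Int Int × Int × Int) h =>
        (s.1.insert h (s.1.getD h 0 + 1), s.2.1 + 1, s.2.2 + h)) s)
    (g := fun (s : PySem.Dict Int Int × Int × Int) (row : List Int) =>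
      ((fun r : List Int => r.take m.toNat) row).foldl (fun (s : PySem.Dict Int Int × Int × Int) h =>
        (s.1.insert h (s.1.getD h 0 + 1), s.2.1 + 1, s.2.2 + h)) s)
    hrow
  rw [hcong, pvB_rows]
  simp

-- totals: over in-range cells, length and sum are the full-range count sums
lemma pv_totals (cells : List Int) (hb : ∀ x ∈ cells, 0 ≤ x ∧ x ≤ 256) :
    pvLo (pvCnt cells) 257 = (cells.length : Int) ∧
    pvLoS (pvCnt cells) 257 = cells.sum := by
  induction cells with
  | nil =>
    have h1 : ∀ y ∈ (PySem.List.pyRange 0 257 1).map (pvCnt []), y = 0 := by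
      intro y hy; rcases List.mem_map.mp hy with ⟨h, _, rfl⟩; simp [pvCnt]
    have h2 : ∀ y ∈ (PySem.List.pyRange 0 257 1).map (fun h => h * pvCnt [] h), y = 0 := by
      intro y hy; rcases List.mem_map.mp hy with ⟨h, _, rfl⟩; simp [pvCnt]
    exact ⟨by simp [pvLo, List.sum_eq_zero h1], by simp [pvLoS, List.sum_eq_zero h2]⟩
  | cons a cells ih =>
    have ha := hb a (List.mem_cons_self ..)
    obtain ⟨ih1, ih2⟩ := ih (fun x hx => hb x (List.mem_cons_of_mem _ hx))
    have hmem : a ∈ PySem.List.pyRange 0 257 1 := by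
      rw [PySem.List.mem_pyRange_one]; omega
    have hnd := PySem.List.nodup_pyRange_one (a := (0:Int)) (b := 257)
    have hcnt : ∀ h : Int, pvCnt (a :: cells) h = pvCnt cells h + (if h = a then 1 else 0) := by
      intro h
      simp only [pvCnt, List.count_cons]
      by_cases hha : h = a
      · simp [hha]
      · simp [hha, show (a == h) = false by simp [Ne.symm hha]]
    constructor
    · unfold pvLo
      rw [show (PySem.List.pyRange 0 257 1).map (pvCnt (a :: cells))
            = (PySem.List.pyRange 0 257 1).map (fun h => pvCnt cells h + (if h = a then 1 else 0)) from
          List.map_congr_left (fun h _ => hcnt h)]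
      rw [pv_sum_map_add, pv_sum_ite _ _ _ hnd hmem]
      unfold pvLo at ih1
      rw [ih1]; simp [List.length_cons]
    · unfold pvLoS
      rw [show (PySem.List.pyRange 0 257 1).map (fun h => h * pvCnt (a :: cells) h)
            = (PySem.List.pyRange 0 257 1).map (fun h => h * pvCnt cells h + (if h = a then h else 0)) from
          List.map_congr_left (fun h _ => by rw [hcnt h]; by_cases hha : h = a <;> simp [hha, mul_add])]
      rw [pv_sum_map_add, pv_sum_ite _ (fun h => h) _ hnd hmem]
      unfold pvLoS at ih2
      rw [ih2]; simp [List.sum_cons]; ring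

-- A's inner scan computes (pvRem, pvAdd)
lemma pvA_scan_eq (hc : List Int) (cnt : Int → Int) (hlen : hc.length = 257)
    (hpt : ∀ k : Nat, k < 257 → hc.getD k 0 = cnt (k : Int)) (hnn : ∀ h : Int, 0 ≤ cnt h)
    (t : Int) (ht0 : 0 ≤ t) (ht1 : t < 257) :
    pvA_scan hc t = (pvRem cnt t, pvAdd cnt t) := by
  unfold pvA_scan
  have hget : ∀ h : Int, 0 ≤ h → h < 257 → PySem.List.pyGetD hc h 0 = cnt h := by
    intro h hh0 hh1
    rw [PySem.List.pyGetD_eq_getElem hc 0 hh0 (by omega)]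
    have h2 := hpt h.toNat (by omega)
    rw [List.getD_eq_getElem?_getD, List.getElem?_eq_getElem (by omega)] at h2
    simp only [Option.getD_some] at h2
    rw [h2, Int.toNat_of_nonneg hh0]
  have hbody := PySem.List.foldl_congr_mem
    (l := PySem.List.pyRange 0 257 1) (init := ((0:Int), (0:Int)))
    (f := fun (ra : Int × Int) h =>
      let c := PySem.List.pyGetD hc h 0
      if c > 0 then
        if h > t then (ra.1 + (h - t) * c, ra.2)
        else if h < t then (ra.1, ra.2 + (t - h) * c)
        else ra
      else ra)
    (g := fun (ra : Int × Int) h =>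
      (ra.1 + (if t < h then (h - t) * cnt h else 0), ra.2 + (if h < t then (t - h) * cnt h else 0)))
    (by
      intro ra h hmem
      rw [PySem.List.mem_pyRange_one] at hmem
      simp only [hget h hmem.1 hmem.2]
      rcases lt_or_eq_of_le (hnn h) with hpos | hzero
      · rw [if_pos hpos]
        rcases lt_trichotomy h t with hlt | heq | hgt
        · rw [if_neg (by omega), if_pos hlt, if_neg (by omega), if_pos hlt]; simp
        · rw [if_neg (by omega), if_neg (by omega), if_neg (by omega), if_neg (by omega)]; simp
        · rw [if_pos hgt, if_pos hgt, if_neg (by omega)]; simp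
      · rw [if_neg (by omega)]
        rcases lt_trichotomy h t with hlt | heq | hgt
        · rw [if_neg (by omega), if_pos hlt]; simp [← hzero]
        · rw [if_neg (by omega), if_neg (by omega)]; simp
        · rw [if_pos hgt, if_neg (by omega)]; simp [← hzero])
  rw [hbody]
  rw [PySem.List.foldl_prod_mk
    (f := fun (x : Int) (h : Int) => x + (if t < h then (h - t) * cnt h else 0))
    (g := fun (x : Int) (h : Int) => x + (if h < t then (t - h) * cnt h else 0))]
  rw [PySem.List.foldl_add, PySem.List.foldl_add]
  have hsplit : PySem.List.pyRange 0 257 1 =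
      PySem.List.pyRange 0 t 1 ++ t :: PySem.List.pyRange (t + 1) 257 1 := by
    rw [PySem.List.pyRange_one_append 0 t 257 ht0 (by omega), PySem.List.pyRange_one_cons ht1]
  refine Prod.ext ?_ ?_
  · show 0 + _ = pvRem cnt t
    rw [hsplit]
    simp only [List.map_append, List.sum_append, List.map_cons, List.sum_cons]
    have hz : ∀ y ∈ (PySem.List.pyRange 0 t 1).map (fun h => if t < h then (h - t) * cnt h else 0), y = 0 := by
      intro y hy; rcases List.mem_map.mp hy with ⟨h, hh, rfl⟩
      rw [PySem.List.mem_pyRange_one] at hh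
      rw [if_neg (by omega)]
    rw [List.sum_eq_zero hz]
    have hcg : (PySem.List.pyRange (t+1) 257 1).map (fun h => if t < h then (h - t) * cnt h else 0)
        = (PySem.List.pyRange (t+1) 257 1).map (fun h => (h - t) * cnt h) := by
      apply List.map_congr_left
      intro h hh
      rw [PySem.List.mem_pyRange_one] at hh
      rw [if_pos (by omega)]
    rw [hcg]
    unfold pvRem
    rw [if_neg (by omega)]
    ring
  · show 0 + _ = pvAdd cnt t
    rw [hsplit]
    simp only [List.map_append, List.sum_append, List.map_cons, List.sum_cons]
    have hz : ∀ y ∈ (PySem.List.pyRange (t+1) 257 1).map (fun h => if h < t then (t - h) * cnt h else 0), y = 0 := by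
      intro y hy; rcases List.mem_map.mp hy with ⟨h, hh, rfl⟩
      rw [PySem.List.mem_pyRange_one] at hh
      rw [if_neg (by omega)]
    have hcg : (PySem.List.pyRange 0 t 1).map (fun h => if h < t then (t - h) * cnt h else 0)
        = (PySem.List.pyRange 0 t 1).map (fun h => (t - h) * cnt h) := by
      apply List.map_congr_left
      intro h hh
      rw [PySem.List.mem_pyRange_one] at hh
      rw [if_pos (by omega)]
    rw [hcg]
    unfold pvAdd
    rw [List.sum_eq_zero hz, if_neg (lt_irrefl t)]
    ring

lemma pvRel_mono (sA : Option Int × Int) (o : Option (Int × Int)) (t0 t1 : Int)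
    (h : pvRel sA o t0) (hle : t0 ≤ t1) : pvRel sA o t1 := by
  rcases h with h | ⟨mt, h1, h2, h3⟩
  · exact Or.inl h
  · exact Or.inr ⟨mt, h1, h2, by omega⟩

-- the selection sweep: both canonical loops stay related
lemma pv_sel (cnt : Int → Int) (b : Int) :
    ∀ (k : Nat) (t0 : Int), 0 ≤ t0 → t0 + (k : Int) = 257 →
    ∀ (sA : Option Int × Int) (sB : Option (Int × Int) × Int × Int),
      sB.2.1 = pvLo cnt t0 → sB.2.2 = pvLoS cnt t0 → pvRel sA sB.1 t0 →
      pvRel ((PySem.List.pyRange t0 257 1).foldl (pvAstep cnt b) sA)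
        (((PySem.List.pyRange t0 257 1).foldl (pvBstep cnt b (pvLo cnt 257) (pvLoS cnt 257)) sB).1)
        257 := by
  intro k
  induction k with
  | zero =>
    intro t0 h0 hk sA sB hbc hbs hrel
    have ht : t0 = 257 := by omega
    subst ht
    rw [PySem.List.pyRange_one_eq_nil (le_refl _)]
    simpa using hrel
  | succ k ih =>
    intro t0 h0 hk sA sB hbc hbs hrel
    have ht : t0 < 257 := by push_cast at hk; omega
    rw [PySem.List.pyRange_one_cons ht, List.foldl_cons, List.foldl_cons]
    have hadd : t0 * sB.2.1 - sB.2.2 = pvAdd cnt t0 := by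
      rw [hbc, hbs, pv_add_eq]
    have hrem : (pvLoS cnt 257 - sB.2.2 - t0 * cnt t0) - t0 * (pvLo cnt 257 - sB.2.1 - cnt t0)
        = pvRem cnt t0 := by
      rw [hbc, hbs, pv_rem_eq cnt t0 h0 ht]
    have hstep2 : (pvBstep cnt b (pvLo cnt 257) (pvLoS cnt 257) sB t0).2.1 = pvLo cnt (t0 + 1) := by
      show sB.2.1 + cnt t0 = _
      rw [hbc, pv_lo_succ cnt t0 h0]
    have hstep3 : (pvBstep cnt b (pvLo cnt 257) (pvLoS cnt 257) sB t0).2.2 = pvLoS cnt (t0 + 1) := by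
      show sB.2.2 + t0 * cnt t0 = _
      rw [hbs, pv_los_succ cnt t0 h0]
    have hrel' : pvRel (pvAstep cnt b sA t0) ((pvBstep cnt b (pvLo cnt 257) (pvLoS cnt 257) sB t0).1) (t0 + 1) := by
      show pvRel _ (let c := cnt t0; let add := t0 * sB.2.1 - sB.2.2;
        let rem := (pvLoS cnt 257 - sB.2.2 - t0 * c) - t0 * (pvLo cnt 257 - sB.2.1 - c);
        if rem + b ≥ add then
          let time := rem * 2 + add
          match sB.1 with
          | none => some (time, t0)
          | some p => if time ≤ p.1 then some (time, t0) else sB.1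
        else sB.1) _
      simp only
      rw [hadd, hrem]
      unfold pvAstep
      by_cases hfeas : pvRem cnt t0 + b ≥ pvAdd cnt t0
      · rw [if_pos hfeas, if_pos hfeas]
        simp only
        rcases hrel with ⟨hA, hB⟩ | ⟨mt, hA, hB, hlt⟩
        · rw [hA, hB]
          show pvRel (some (pvRem cnt t0 * 2 + pvAdd cnt t0), t0)
            (some (pvRem cnt t0 * 2 + pvAdd cnt t0, t0)) (t0 + 1)
          exact Or.inr ⟨_, rfl, rfl, by omega⟩
        · rw [hA, hB]
          simp only
          by_cases hle : pvRem cnt t0 * 2 + pvAdd cnt t0 ≤ mt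
          · rw [if_pos hle, if_pos (show pvRem cnt t0 * 2 + pvAdd cnt t0 < mt ∨
                (pvRem cnt t0 * 2 + pvAdd cnt t0 = mt ∧ t0 > sA.2) by omega)]
            show pvRel (some (pvRem cnt t0 * 2 + pvAdd cnt t0), t0)
              (some (pvRem cnt t0 * 2 + pvAdd cnt t0, t0)) (t0 + 1)
            exact Or.inr ⟨_, rfl, rfl, by omega⟩
          · rw [if_neg hle, if_neg (show ¬(pvRem cnt t0 * 2 + pvAdd cnt t0 < mt ∨
                (pvRem cnt t0 * 2 + pvAdd cnt t0 = mt ∧ t0 > sA.2)) by omega)]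
            exact Or.inr ⟨mt, hA, hB ▸ rfl, by omega⟩
      · rw [if_neg hfeas, if_neg hfeas]
        exact pvRel_mono _ _ _ _ hrel (by omega)
    exact ih (t0 + 1) (by omega) (by push_cast at hk ⊢; omega) _ _ hstep2 hstep3 hrel'

-- pvRel at the end gives equal extracted outputs
def pvOutA (sA : Option Int × Int) : Int × Int :=
  match sA.1 with | some mt => (mt, sA.2) | none => (0, 0)
def pvOutB (o : Option (Int × Int)) : Int × Int :=
  match o with | some p => p | none => (0, 0)
lemma pv_rel_out (sA : Option Int × Int) (o : Option (Int × Int)) (h : pvRel sA o 257) :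
    pvOutA sA = pvOutB o := by
  obtain ⟨s1, s2⟩ := sA
  rcases h with ⟨hA, hB⟩ | ⟨mt, hA, hB, _⟩
  · simp only at hA hB; subst hA; subst hB; rfl
  · simp only at hA hB; subst hA; subst hB; rfl

-- ===== VERDICT (by name: the statement is the Claim_ definition above) =====
set_option maxRecDepth 4096 in
theorem flatten_land_spec : Claim_equal_flatten_land := by
  intro n m b land _ hpre
  obtain ⟨hpos, _⟩ := hpre
  -- (the feasibility conjunct of Pre_ only keeps Python A's return an int / B's non-None)
  have key : (pvA_counts n m land).length = 257 ∧
      (∀ k : Nat, k < 257 →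
        (pvA_counts n m land).getD k 0 = pvCnt (pvCells n m land) (k : Int)) ∧
      (∀ x ∈ pvCells n m land, 0 ≤ x ∧ x ≤ 256) := by
    by_cases hnm : 0 < n ∧ 0 < m
    · obtain ⟨h1, h34⟩ := hpos hnm.1 hnm.2
      have hcell : ∀ x ∈ pvCells n m land, 0 ≤ x ∧ x ≤ 256 := by
        intro x hx
        rcases List.mem_flatten.mp hx with ⟨l, hl, hxl⟩
        rcases List.mem_map.mp hl with ⟨row, hrow, rfl⟩
        exact (h34 row hrow).2 x hxl
      have hA := pvA_counts_eq n m land (by omega) h1 (by omega) (fun row hr => (h34 row hr).1)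
      obtain ⟨hclen, hcpt⟩ := pv_count_inv (pvCells n m land) (List.replicate 257 0)
        (List.length_replicate ..) hcell
      refine ⟨by rw [hA]; exact hclen, fun k hk => ?_, hcell⟩
      rw [hA, hcpt k hk, pv_getD_replicate k hk, pvCnt]
      ring
    · have hz : n ≤ 0 ∨ m ≤ 0 := by omega
      have hcells : pvCells n m land = [] := by
        rcases hz with h | h
        · have hn0 : n.toNat = 0 := by omega
          simp [pvCells, hn0]
        · have hm0 : m.toNat = 0 := by omega
          simp [pvCells, hm0]
      have hA := pvA_counts_trivial n m land hz
      refine ⟨by rw [hA]; exact List.length_replicate .., fun k hk => ?_, by simp [hcells]⟩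
      rw [hA, pv_getD_replicate k hk, hcells]
      simp [pvCnt]
  obtain ⟨hlenA, hptA, hcell⟩ := key
  have hnn : ∀ h : Int, 0 ≤ pvCnt (pvCells n m land) h := fun h => Int.natCast_nonneg _
  have hB := pvB_count_eq n m land
  obtain ⟨htot1, htot2⟩ := pv_totals (pvCells n m land) hcell
  have hgd : ∀ t : Int,
      ((pvCells n m land).foldl (fun d h => d.insert h (d.getD h 0 + 1)) PySem.Dict.empty).getD t 0
        = pvCnt (pvCells n m land) t := by
    intro t
    rw [PySem.Dict.getD_foldl_insert_add_one, PySem.Dict.getD_empty, pvCnt]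
    ring
  show flatten_land n m b land = flatten_land_alt n m b land
  unfold flatten_land flatten_land_alt
  rw [hB]
  simp only
  -- replace both per-target step functions by their canonical forms
  have hAcong := PySem.List.foldl_congr_mem
    (l := PySem.List.pyRange 0 257 1) (init := ((none : Option Int), (0:Int)))
    (f := pvA_pick b (pvA_counts n m land))
    (g := pvAstep (pvCnt (pvCells n m land)) b)
    (by
      intro s t hmem
      rw [PySem.List.mem_pyRange_one] at hmem
      unfold pvA_pick pvAstep
      rw [pvA_scan_eq (pvA_counts n m land) (pvCnt (pvCells n m land)) hlenA hptA hnn t hmem.1 hmem.2])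
  have hBcong := PySem.List.foldl_congr_mem
    (l := PySem.List.pyRange 0 257 1)
    (init := ((none : Option (Int × Int)), (0:Int), (0:Int)))
    (f := pvB_step b ((pvCells n m land).length : Int) (pvCells n m land).sum
      ((pvCells n m land).foldl (fun d h => d.insert h (d.getD h 0 + 1)) PySem.Dict.empty))
    (g := pvBstep (pvCnt (pvCells n m land)) b (pvLo (pvCnt (pvCells n m land)) 257)
      (pvLoS (pvCnt (pvCells n m land)) 257))
    (by
      intro s t _
      unfold pvB_step pvBstep
      rw [hgd t, htot1, htot2])
  rw [hAcong, hBcong]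
  have hfin := pv_sel (pvCnt (pvCells n m land)) b 257 0 (by omega) (by norm_num)
    ((none : Option Int), (0:Int)) ((none : Option (Int × Int)), (0:Int), (0:Int))
    (pv_lo_zero _).symm (pv_los_zero _).symm (Or.inl ⟨rfl, rfl⟩)
  exact pv_rel_out _ _ hfin
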